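-- pv_equiv track=rewrite | github.com/isgulkin/home | Algorithms/onPynton/big_politics/big_politics.py | big_politics
-- ===== SOURCE A (Python) =====
-- import heapq
--
-- def big_politics(p: list) -> int:
--     heapq.heapify(p)
--     total = 0
--     while len(p) > 1:
--         min_1 = heapq.heappop(p)
--         min_2 = heapq.heappop(p)
--         min_0 = min_1 + min_2
--         total += min_0
--         heapq.heappush(p, min_0)
--     return total
-- ===== SOURCE B (Python) =====
-- # Two-queue Huffman method: sort once, then merge using the sorted array and a
-- # FIFO queue of merged sums (merged sums need no heap).  Unlike A, B does not
-- # mutate p (A heapifies and drains p in place); the return value is the same.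
-- def _take(xs, q, i, j):
--     if i < len(xs) and (j >= len(q) or xs[i] <= q[j]):
--         return xs[i], i + 1, j
--     return q[j], i, j + 1
--
-- def big_politics(p: list) -> int:
--     xs = sorted(p)
--     q = []
--     i = j = 0
--     total = 0
--     while (len(xs) - i) + (len(q) - j) > 1:
--         a, i, j = _take(xs, q, i, j)
--         b, i, j = _take(xs, q, i, j)
--         s = a + b
--         total += s
--         q.append(s)
--     return total
-- ===== Notes on version B (the rewrite author's own statement) =====
-- stated objective: alternative
-- what changed: Replaces the binary heap with the two-queue Huffman method: sort p once, then repeatedly take the smaller of the sorted array's head and the head of a FIFO queue of merged sums (which stays sorted automatically), appending each sum to the queue's back; no heap sift operations, and B leaves p unmutated where A drains it in place.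
import Mathlib
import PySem

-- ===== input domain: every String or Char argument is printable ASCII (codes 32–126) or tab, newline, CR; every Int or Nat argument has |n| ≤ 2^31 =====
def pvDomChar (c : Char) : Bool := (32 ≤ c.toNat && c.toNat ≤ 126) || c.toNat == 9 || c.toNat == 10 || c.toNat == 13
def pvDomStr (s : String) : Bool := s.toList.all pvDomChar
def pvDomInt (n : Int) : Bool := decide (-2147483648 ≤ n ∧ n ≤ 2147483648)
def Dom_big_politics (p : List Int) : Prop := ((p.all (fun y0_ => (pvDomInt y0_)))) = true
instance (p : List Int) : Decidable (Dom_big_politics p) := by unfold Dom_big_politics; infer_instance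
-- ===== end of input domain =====

-- B replaces A's binary heap with the two-queue Huffman method (sort once + a FIFO
-- queue of merged sums); equivalence is about the RETURN value only: A mutates p
-- (heapifies and drains it in place), B leaves p unchanged.

-- ===== PORT A =====
-- A uses the stdlib heapq; PySem has no heap, so the heap is ported at the level of
-- the values A observes: heappop returns the minimum of the current elements and
-- removes it, heappush adds an element.  pvPopMin removes a minimal element (exact
-- for the popped VALUE, which with the length is all A's code observes of the heap;
-- the heap's internal layout is not observable in A's return value).
def pvPopMin : List Int → Int × List Int
  | [] => (0, [])                         -- unreachable guard (A pops only when len > 1)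
  | [x] => (x, [])
  | x :: y :: r =>
    let m := pvPopMin (y :: r)
    if x ≤ m.1 then (x, y :: r) else (m.1, x :: m.2)

theorem pvPopMin_length : ∀ l : List Int, l ≠ [] → ((pvPopMin l).2).length + 1 = l.length
  | [x], _ => rfl
  | x :: y :: r, _ => by
    have ih := pvPopMin_length (y :: r) (by simp)
    simp only [pvPopMin]
    split
    · simp
    · simpa using ih

-- the while-loop of A: pop two minima, push their sum, accumulate the total
def pvALoop (l : List Int) (total : Int) : Int :=
  if h : 1 < l.length then
    pvALoop ((pvPopMin (pvPopMin l).2).2 ++ [(pvPopMin l).1 + (pvPopMin (pvPopMin l).2).1])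
            (total + ((pvPopMin l).1 + (pvPopMin (pvPopMin l).2).1))
  else total
termination_by l.length
decreasing_by
  have h1 := pvPopMin_length l (by intro e; subst e; simp at h)
  have h2 := pvPopMin_length (pvPopMin l).2
    (by intro e; rw [e] at h1; simp at h1; omega)
  simp only [List.length_append, List.length_cons, List.length_nil]
  omega

def big_politics (p : List Int) : Int := pvALoop p 0

-- ===== PORT B =====
-- _take of Source B: the smaller of the two current heads (ties to xs), consumed
def pvTake : List Int → List Int → Int × List Int × List Int
  | [], [] => (0, [], [])                 -- unreachable guard (loop runs only when > 1 element remains)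
  | x :: xr, [] => (x, xr, [])
  | [], z :: qr => (z, [], qr)
  | x :: xr, z :: qr => if x ≤ z then (x, xr, z :: qr) else (z, x :: xr, qr)

theorem pvTake_length : ∀ xs q : List Int, ¬(xs = [] ∧ q = []) →
    (pvTake xs q).2.1.length + (pvTake xs q).2.2.length + 1 = xs.length + q.length
  | [], [], h => absurd ⟨rfl, rfl⟩ h
  | x :: xr, [], _ => by simp [pvTake]
  | [], z :: qr, _ => by simp [pvTake]
  | x :: xr, z :: qr, _ => by
    simp only [pvTake]
    split <;> simp <;> omega

-- the while-loop of Source B: indices into xs / q become structural consumption of the lists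
def pvBLoop (xs q : List Int) (total : Int) : Int :=
  if h : 1 < xs.length + q.length then
    pvBLoop (pvTake (pvTake xs q).2.1 (pvTake xs q).2.2).2.1
            ((pvTake (pvTake xs q).2.1 (pvTake xs q).2.2).2.2
              ++ [(pvTake xs q).1 + (pvTake (pvTake xs q).2.1 (pvTake xs q).2.2).1])
            (total + ((pvTake xs q).1 + (pvTake (pvTake xs q).2.1 (pvTake xs q).2.2).1))
  else total
termination_by xs.length + q.length
decreasing_by
  have h1 := pvTake_length xs q (by rintro ⟨e1, e2⟩; subst e1; subst e2; simp at h)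
  have h2 := pvTake_length (pvTake xs q).2.1 (pvTake xs q).2.2
    (by rintro ⟨e1, e2⟩; rw [e1, e2] at h1; simp at h1; omega)
  simp only [List.length_append, List.length_cons, List.length_nil]
  omega

def big_politics_alt (p : List Int) : Int :=
  pvBLoop (PySem.List.sorted p (fun x => x) false) [] 0

-- ===== PRECONDITION & SPEC =====
def Spec_big_politics (p : List Int) (out : Int) : Prop := out = big_politics_alt p
instance (p : List Int) (out : Int) : Decidable (Spec_big_politics p out) := by unfold Spec_big_politics; infer_instance

-- ===== CLAIM (what is proved, stated in full; the proofs are below) =====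
def Claim_equal_big_politics : Prop := ∀ (p : List Int), Dom_big_politics p → Spec_big_politics p (big_politics p)

-- ===== LEMMAS AND PROOFS =====

theorem pvPopMin_spec : ∀ l : List Int, l ≠ [] →
    (pvPopMin l).1 ∈ l ∧ (∀ u ∈ l, (pvPopMin l).1 ≤ u) ∧
    l.Perm ((pvPopMin l).1 :: (pvPopMin l).2)
  | [x], _ => by simp [pvPopMin]
  | x :: y :: r, _ => by
    obtain ⟨ihmem, ihmin, ihperm⟩ := pvPopMin_spec (y :: r) (by simp)
    simp only [pvPopMin]
    split
    · rename_i hle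
      refine ⟨by simp, ?_, List.Perm.refl _⟩
      intro u hu
      rcases List.mem_cons.1 hu with h | h
      · exact le_of_eq h.symm
      · exact le_trans hle (ihmin u h)
    · rename_i hlt
      refine ⟨List.mem_cons_of_mem x ihmem, ?_, ?_⟩
      · intro u hu
        rcases List.mem_cons.1 hu with h | h
        · subst h; exact le_of_lt (lt_of_not_ge hlt)
        · exact ihmin u h
      · exact (ihperm.cons x).trans (List.Perm.swap _ _ _)

theorem pvTake_spec : ∀ xs q : List Int, ¬(xs = [] ∧ q = []) →
    xs.Pairwise (· ≤ ·) → q.Pairwise (· ≤ ·) →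
    (xs ++ q).Perm ((pvTake xs q).1 :: ((pvTake xs q).2.1 ++ (pvTake xs q).2.2)) ∧
    (∀ u ∈ (pvTake xs q).2.1 ++ (pvTake xs q).2.2, (pvTake xs q).1 ≤ u) ∧
    (pvTake xs q).2.1.Pairwise (· ≤ ·) ∧ (pvTake xs q).2.2.Pairwise (· ≤ ·) ∧
    (((pvTake xs q).1 ∈ xs ∧ (pvTake xs q).2.2 = q) ∨
      (∃ qr, q = (pvTake xs q).1 :: qr ∧ (pvTake xs q).2.2 = qr))
  | [], [], h, _, _ => absurd ⟨rfl, rfl⟩ h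
  | x :: xr, [], _, hxs, hq => by
    simp only [pvTake]
    exact ⟨by simp, by simpa using (List.pairwise_cons.1 hxs).1,
      (List.pairwise_cons.1 hxs).2, by simp, Or.inl (by simp)⟩
  | [], z :: qr, _, hxs, hq => by
    simp only [pvTake]
    exact ⟨by simp, by simpa using (List.pairwise_cons.1 hq).1,
      by simp, (List.pairwise_cons.1 hq).2, Or.inr ⟨qr, rfl, rfl⟩⟩
  | x :: xr, z :: qr, _, hxs, hq => by
    have hx1 := (List.pairwise_cons.1 hxs).1
    have hx2 := (List.pairwise_cons.1 hxs).2
    have hq1 := (List.pairwise_cons.1 hq).1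
    have hq2 := (List.pairwise_cons.1 hq).2
    simp only [pvTake]
    split
    · rename_i hle
      refine ⟨List.Perm.refl _, ?_, hx2, hq, Or.inl (by simp)⟩
      intro u hu
      rcases List.mem_append.1 hu with h | h
      · exact hx1 u h
      · rcases List.mem_cons.1 h with h | h
        · exact h ▸ hle
        · exact le_trans hle (hq1 u h)
    · rename_i hgt
      have hzx : z ≤ x := le_of_lt (lt_of_not_ge hgt)
      refine ⟨?_, ?_, hxs, hq2, Or.inr ⟨qr, rfl, rfl⟩⟩
      · exact List.perm_middle
      · intro u hu
        rcases List.mem_append.1 hu with h | h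
        · rcases List.mem_cons.1 h with h | h
          · exact h ▸ hzx
          · exact le_trans hzx (le_trans (le_of_eq rfl) (hx1 u h))
        · exact hq1 u h

theorem sorted_le_getLast : ∀ (q : List Int), q.Pairwise (· ≤ ·) → ∀ z ∈ q, ∀ gl ∈ q.getLast?, z ≤ gl
  | [x], _, z, hz, gl, hgl => by
    simp at hz hgl; omega
  | x :: y :: r, hs, z, hz, gl, hgl => by
    have hs' := (List.pairwise_cons.1 hs).2
    have hgl' : gl ∈ (y :: r).getLast? := by
      simpa [List.getLast?_cons_cons] using hgl
    rcases List.mem_cons.1 hz with h | h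
    · subst h
      have hy : y ∈ y :: r := by simp
      exact le_trans ((List.pairwise_cons.1 hs).1 y hy)
        (sorted_le_getLast (y :: r) hs' y hy gl hgl')
    · exact sorted_le_getLast (y :: r) hs' z h gl hgl' 

theorem key_lemma : ∀ (n : ℕ) (l xs q : List Int) (total : Int), l.length = n →
    l.Perm (xs ++ q) → xs.Pairwise (· ≤ ·) → q.Pairwise (· ≤ ·) →
    (∀ gl ∈ q.getLast?, ∀ u ∈ xs ++ q.dropLast, gl ≤ 2 * u) →
    pvALoop l total = pvBLoop xs q total := by
  intro n
  induction n using Nat.strong_induction_on with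
  | _ n ih =>
  intro l xs q total hn hperm hxs hq hC
  have hlen : xs.length + q.length = l.length := by
    have := hperm.length_eq
    simp only [List.length_append] at this
    omega
  by_cases h : 1 < l.length
  · rw [pvALoop, pvBLoop, dif_pos h, dif_pos (by omega)]
    have hl0 : l ≠ [] := by intro e; subst e; simp at h
    obtain ⟨ha1mem, ha1min, ha1perm⟩ := pvPopMin_spec l hl0
    have hne1 : ¬(xs = [] ∧ q = []) := by
      rintro ⟨e1, e2⟩; subst e1; subst e2; simp at hlen; omega
    obtain ⟨hb1perm, hb1min, hbxs1, hbq1, hb1case⟩ := pvTake_spec xs q hne1 hxs hq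
    have hm1 : (pvPopMin l).1 = (pvTake xs q).1 := by
      apply le_antisymm
      · exact ha1min _ (hperm.symm.subset (hb1perm.symm.subset (by simp)))
      · have hmem : (pvPopMin l).1 ∈
            (pvTake xs q).1 :: ((pvTake xs q).2.1 ++ (pvTake xs q).2.2) :=
          hb1perm.subset (hperm.subset ha1mem)
        rcases List.mem_cons.1 hmem with e | hm
        · exact le_of_eq e.symm
        · exact hb1min _ hm
    have hrem1 : (pvPopMin l).2.Perm ((pvTake xs q).2.1 ++ (pvTake xs q).2.2) := by
      have hx := ha1perm.symm.trans (hperm.trans hb1perm)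
      rw [hm1] at hx
      exact hx.cons_inv
    have hl1len : (pvPopMin l).2.length + 1 = l.length := pvPopMin_length l hl0
    have hl1ne : (pvPopMin l).2 ≠ [] := by
      intro e; rw [e] at hl1len; simp at hl1len; omega
    obtain ⟨ha2mem, ha2min, ha2perm⟩ := pvPopMin_spec _ hl1ne
    have hne2 : ¬((pvTake xs q).2.1 = [] ∧ (pvTake xs q).2.2 = []) := by
      rintro ⟨e1, e2⟩
      rw [e1, e2] at hrem1
      have hz := hrem1.length_eq
      simp at hz
      exact hl1ne hz
    obtain ⟨hb2perm, hb2min, hbxs2, hbq2, hb2case⟩ :=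
      pvTake_spec _ _ hne2 hbxs1 hbq1
    have hm2 : (pvPopMin (pvPopMin l).2).1 =
        (pvTake (pvTake xs q).2.1 (pvTake xs q).2.2).1 := by
      apply le_antisymm
      · exact ha2min _ (hrem1.symm.subset (hb2perm.symm.subset (by simp)))
      · have hmem : (pvPopMin (pvPopMin l).2).1 ∈
            (pvTake (pvTake xs q).2.1 (pvTake xs q).2.2).1 ::
              ((pvTake (pvTake xs q).2.1 (pvTake xs q).2.2).2.1 ++
               (pvTake (pvTake xs q).2.1 (pvTake xs q).2.2).2.2) :=
          hb2perm.subset (hrem1.subset ha2mem)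
        rcases List.mem_cons.1 hmem with e | hm
        · exact le_of_eq e.symm
        · exact hb2min _ hm
    have hrem2 : (pvPopMin (pvPopMin l).2).2.Perm
        ((pvTake (pvTake xs q).2.1 (pvTake xs q).2.2).2.1 ++
         (pvTake (pvTake xs q).2.1 (pvTake xs q).2.2).2.2) := by
      have hx := ha2perm.symm.trans (hrem1.trans hb2perm)
      rw [hm2] at hx
      exact hx.cons_inv
    have hl2len : (pvPopMin (pvPopMin l).2).2.length + 1 = (pvPopMin l).2.length :=
      pvPopMin_length _ hl1ne
    have ht12 : (pvTake xs q).1 ≤ (pvTake (pvTake xs q).2.1 (pvTake xs q).2.2).1 :=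
      hb1min _ (hb2perm.symm.subset (by simp))
    -- elements of q2 are bounded by the new sum s = t1 + t2
    have hq1sub : ∀ w ∈ (pvTake xs q).2.2, w ∈ q := by
      rcases hb1case with ⟨_, e⟩ | ⟨qr, e1, e2⟩
      · rw [e]; exact fun w hw => hw
      · rw [e2, e1]; exact fun w hw => List.mem_cons_of_mem _ hw
    have hzs : ∀ z ∈ (pvTake (pvTake xs q).2.1 (pvTake xs q).2.2).2.2,
        z ≤ (pvTake xs q).1 + (pvTake (pvTake xs q).2.1 (pvTake xs q).2.2).1 := by
      intro z hz
      have hzq1 : z ∈ (pvTake xs q).2.2 := by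
        rcases hb2case with ⟨_, e⟩ | ⟨qr, e1, e2⟩
        · rw [e] at hz; exact hz
        · rw [e2] at hz; rw [e1]; exact List.mem_cons_of_mem _ hz
      have hzq : z ∈ q := hq1sub z hzq1
      have hqne : q ≠ [] := List.ne_nil_of_mem hzq
      obtain ⟨gl, hgl⟩ := Option.isSome_iff_exists.1 (List.getLast?_isSome.2 hqne)
      have hzgl : z ≤ gl := sorted_le_getLast q hq z hzq gl (by simp [hgl])
      have ht1mem : (pvTake xs q).1 ∈ xs ++ q.dropLast := by
        rcases hb1case with ⟨hmemxs, _⟩ | ⟨qr, e1, e2⟩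
        · exact List.mem_append.2 (Or.inl hmemxs)
        · have hqr : qr ≠ [] := by
            intro e; rw [e] at e2; rw [e2] at hzq1; simp at hzq1
          apply List.mem_append.2
          right
          obtain ⟨w, ws, rfl⟩ := List.exists_cons_of_ne_nil hqr
          generalize hv : (pvTake xs q).1 = v at e1 ⊢
          rw [e1]
          simp
      have hgl2 : gl ≤ 2 * (pvTake xs q).1 := hC gl (by simp [hgl]) _ ht1mem
      omega
    rw [hm1, hm2]
    apply ih (n - 1) (by omega)
    · -- length
      simp only [List.length_append, List.length_cons, List.length_nil]
      omega
    · -- permutation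
      have hp := hrem2.append_right
        [(pvTake xs q).1 + (pvTake (pvTake xs q).2.1 (pvTake xs q).2.2).1]
      rwa [List.append_assoc] at hp
    · exact hbxs2
    · -- the queue stays sorted
      apply List.pairwise_append.2
      exact ⟨hbq2, by simp, fun a ha b hb => by
        simp at hb; subst hb; exact hzs a ha⟩
    · -- the invariant is preserved
      intro gl hgl u hu
      rw [List.getLast?_concat] at hgl
      simp only [Option.mem_def, Option.some.injEq] at hgl
      subst hgl
      rw [List.dropLast_concat] at hu
      have hu2 : (pvTake (pvTake xs q).2.1 (pvTake xs q).2.2).1 ≤ u := hb2min u hu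
      omega
  · rw [pvALoop, pvBLoop, dif_neg h, dif_neg (by omega)]

-- ===== VERDICT (by name: the statement is the Claim_ definition above) =====
theorem big_politics_spec : Claim_equal_big_politics := by
  intro p _
  unfold Spec_big_politics big_politics big_politics_alt
  exact key_lemma p.length p (PySem.List.sorted p (fun x => x) false) [] 0 rfl
    (by simpa using (PySem.List.sorted_perm (xs := p) (key := fun x => x) (rev := false)).symm)
    (PySem.List.sorted_pairwise (xs := p) (key := fun x => x))
    (by simp)
    (by simp)
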